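-- pv_equiv track=rewrite | github.com/sakshi3861/Synapse-Tasks | Task1.py | find_strongest_squads
-- ===== SOURCE A (Python) =====
-- from itertools import combinations
--
-- def find_strongest_squads(pokedex, k):
--     """
--     Return the max unique types any squad of size k can cover,
--     along with all squads that achieve that max.
--     """
--     max_types = 0
--     strongest_squads = []
--
--     for squad in combinations(pokedex.keys(), k):
--         types_union = set()
--         for mon in squad:
--             types_union.update(pokedex[mon])
--         type_count = len(types_union)
--
--         if type_count > max_types:
--             max_types = type_count
--             strongest_squads = [(squad, types_union)]
--         elif type_count == max_types:
--             strongest_squads.append((squad, types_union))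
--
--     return max_types, strongest_squads
-- ===== SOURCE B (Python) =====
-- from itertools import combinations
--
-- def find_strongest_squads(pokedex, k):
--     pairs = [(squad, {t for mon in squad for t in pokedex[mon]})
--              for squad in combinations(pokedex, k)]
--     max_types = max((len(u) for _, u in pairs), default=0)
--     return max_types, [(s, u) for s, u in pairs if len(u) == max_types]
-- ===== Notes on version B (the rewrite author's own statement) =====
-- stated objective: idiomatic
-- what changed: A's single interleaved scan with a running max and reset/append state machine is replaced by materializing all (squad, type-union) pairs, then taking max(..., default=0) and a filter comprehension over that list.
import Mathlib
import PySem

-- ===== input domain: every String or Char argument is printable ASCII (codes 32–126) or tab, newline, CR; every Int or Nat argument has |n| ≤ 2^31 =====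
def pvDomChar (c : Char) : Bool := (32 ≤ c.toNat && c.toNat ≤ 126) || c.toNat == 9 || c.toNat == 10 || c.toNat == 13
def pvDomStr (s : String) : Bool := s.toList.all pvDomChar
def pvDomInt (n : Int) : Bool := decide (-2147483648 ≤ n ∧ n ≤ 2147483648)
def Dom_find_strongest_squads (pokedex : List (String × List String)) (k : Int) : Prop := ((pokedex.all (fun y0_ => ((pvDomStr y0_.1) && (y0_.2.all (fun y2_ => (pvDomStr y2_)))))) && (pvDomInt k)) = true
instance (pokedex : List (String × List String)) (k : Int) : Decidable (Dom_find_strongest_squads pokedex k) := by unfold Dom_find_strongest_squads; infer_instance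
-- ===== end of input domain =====

-- B materializes all (squad, union) pairs and then reduces twice (max, filter) instead of A's interleaved running-max scan; objective: idiomatic.

-- itertools.combinations(l, n) in l's order (shared helper: both Pythons call the same builtin)
def pvCombos : List String → Nat → List (List String)
  | _, 0 => [[]]
  | [], _ + 1 => []
  | x :: xs, n + 1 => ((pvCombos xs n).map (fun c => x :: c)) ++ pvCombos xs (n + 1)

-- ===== PORT A =====
def find_strongest_squads (pokedex : List (String × List String)) (k : Int) : Int × (List (List String × List String)) :=
  (pvCombos (PySem.Dict.keys (PySem.Dict.mk pokedex)) k.toNat).foldl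
    (fun st squad =>
      let types_union : PySem.Set String :=
        squad.foldl (fun s mon => PySem.Set.update s (PySem.Dict.getD (PySem.Dict.mk pokedex) mon [])) PySem.Set.empty
      let type_count : Int := types_union.length
      if type_count > st.1 then (type_count, [(squad, types_union)])
      else if type_count = st.1 then (st.1, st.2 ++ [(squad, types_union)])
      else st)
    (0, [])

-- ===== PORT B =====
def find_strongest_squads_alt (pokedex : List (String × List String)) (k : Int) : Int × (List (List String × List String)) :=
  let pairs : List (List String × List String) :=
    (pvCombos (PySem.Dict.keys (PySem.Dict.mk pokedex)) k.toNat).map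
      (fun squad => (squad, PySem.Set.ofList (squad.flatMap (fun mon => PySem.Dict.getD (PySem.Dict.mk pokedex) mon []))))
  let max_types : Int := (PySem.List.max? (pairs.map (fun p => (p.2.length : Int))) (fun x => x)).getD 0
  (max_types, pairs.filter (fun p => (p.2.length : Int) == max_types))

-- ===== PRECONDITION & SPEC =====
-- A raises ValueError (combinations with negative r) exactly when k < 0; that is all Pre_ excludes.
def Pre_find_strongest_squads (pokedex : List (String × List String)) (k : Int) : Prop := 0 ≤ k
instance (pokedex : List (String × List String)) (k : Int) : Decidable (Pre_find_strongest_squads pokedex k) := by unfold Pre_find_strongest_squads; infer_instance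
def pvWitness_find_strongest_squads : (List (String × List String)) × Int := ([("a", ["x", "y"]), ("b", ["y"])], 1)

def Spec_find_strongest_squads (pokedex : List (String × List String)) (k : Int) (out : Int × (List (List String × List String))) : Prop := out = find_strongest_squads_alt pokedex k
instance (pokedex : List (String × List String)) (k : Int) (out : Int × (List (List String × List String))) : Decidable (Spec_find_strongest_squads pokedex k out) := by unfold Spec_find_strongest_squads; infer_instance

-- ===== CLAIM (what is proved, stated in full; the proofs are below) =====
def Claim_equal_find_strongest_squads : Prop := ∀ (pokedex : List (String × List String)) (k : Int), Dom_find_strongest_squads pokedex k → Pre_find_strongest_squads pokedex k → Spec_find_strongest_squads pokedex k (find_strongest_squads pokedex k)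

-- ===== LEMMAS AND PROOFS =====

-- the per-squad unions agree: A's update loop = B's set-of-flattened-list
theorem pv_union_eq (f : String → List String) (l : List String) (s : PySem.Set String) :
    l.foldl (fun s mon => PySem.Set.update s (f mon)) s = (l.flatMap f).foldl PySem.Set.add s := by
  induction l generalizing s with
  | nil => rfl
  | cons x xs ih =>
    simp only [List.flatMap_cons, List.foldl_append, List.foldl_cons, PySem.Set.update]
    simpa [PySem.Set.update] using ih (List.foldl PySem.Set.add s (f x))

-- the length of a pair's union, as Python's len (an Int)
def pvLen (p : List String × List String) : Int := p.2.length

-- running max of the union sizes, i.e. A's max_types after the scan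
def pvM (ps : List (List String × List String)) (m : Int) : Int :=
  (ps.map pvLen).foldl max m

theorem pv_le_foldl_max (l : List Int) (x : Int) : x ≤ l.foldl max x := by
  induction l generalizing x with
  | nil => simp
  | cons a l ih => exact le_trans (le_max_left x a) (ih _)

theorem pv_le_pvM (ps : List (List String × List String)) (m : Int) : m ≤ pvM ps m :=
  pv_le_foldl_max _ _

-- characterisation of A's interleaved scan over an arbitrary pairs list
theorem pv_loop_char (ps : List (List String × List String)) (m : Int) (acc : List (List String × List String)) :
    ps.foldl
      (fun st p =>
        if pvLen p > st.1 then (pvLen p, [p])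
        else if pvLen p = st.1 then (st.1, st.2 ++ [p])
        else st) (m, acc)
    = (pvM ps m,
       if pvM ps m = m then acc ++ ps.filter (fun p => pvLen p == pvM ps m)
       else ps.filter (fun p => pvLen p == pvM ps m)) := by
  induction ps generalizing m acc with
  | nil => simp [pvM]
  | cons p ps ih =>
    have hM : pvM (p :: ps) m = pvM ps (max m (pvLen p)) := by simp [pvM]
    simp only [List.foldl_cons]
    by_cases h1 : pvLen p > m
    · rw [if_pos h1, ih, hM, max_eq_right (le_of_lt h1)]
      have hne : pvM ps (pvLen p) ≠ m := by
        have := pv_le_pvM ps (pvLen p); omega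
      rw [if_neg hne]
      by_cases h2 : pvM ps (pvLen p) = pvLen p
      · rw [if_pos h2, List.filter_cons_of_pos (by simp [h2]), List.singleton_append]
      · rw [if_neg h2, List.filter_cons_of_neg (by simp; omega)]
    · rw [if_neg h1]
      by_cases h2 : pvLen p = m
      · rw [if_pos h2, ih, hM, h2, max_self]
        by_cases h3 : pvM ps m = m
        · rw [if_pos h3, if_pos h3, List.filter_cons_of_pos (by simp [h2, h3]), List.append_assoc, List.singleton_append]
        · rw [if_neg h3, if_neg h3, List.filter_cons_of_neg (by simp; omega)]
      · rw [if_neg h2, ih, hM, max_eq_left (by omega)]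
        have hne : pvLen p ≠ pvM ps m := by
          have := pv_le_pvM ps m; omega
        rw [List.filter_cons_of_neg (by simp [hne])]

-- the shared pair constructor (squad, union of its members' type lists)
def pvG (pokedex : List (String × List String)) (squad : List String) : List String × List String :=
  (squad, (squad.flatMap (fun mon => PySem.Dict.getD (PySem.Dict.mk pokedex) mon [])).foldl PySem.Set.add PySem.Set.empty)

def pvPairs (pokedex : List (String × List String)) (k : Int) : List (List String × List String) :=
  (pvCombos (PySem.Dict.keys (PySem.Dict.mk pokedex)) k.toNat).map (pvG pokedex)

def pvStep (st : Int × List (List String × List String)) (p : List String × List String) :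
    Int × List (List String × List String) :=
  if pvLen p > st.1 then (pvLen p, [p])
  else if pvLen p = st.1 then (st.1, st.2 ++ [p])
  else st

theorem pv_A_eq (pokedex : List (String × List String)) (k : Int) :
    find_strongest_squads pokedex k = (pvPairs pokedex k).foldl pvStep (0, []) := by
  unfold find_strongest_squads pvPairs
  rw [List.foldl_map]
  simp only [pv_union_eq]
  rfl

theorem pv_B_eq (pokedex : List (String × List String)) (k : Int) :
    find_strongest_squads_alt pokedex k =
      ((PySem.List.max? ((pvPairs pokedex k).map pvLen) (fun x => x)).getD 0,
       (pvPairs pokedex k).filter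
         (fun p => pvLen p == (PySem.List.max? ((pvPairs pokedex k).map pvLen) (fun x => x)).getD 0)) := by
  rfl

theorem find_strongest_squads_spec : Claim_equal_find_strongest_squads := by
  intro pokedex k _ _
  show find_strongest_squads pokedex k = find_strongest_squads_alt pokedex k
  rw [pv_A_eq, pv_B_eq]
  have hstep : pvStep = (fun st p =>
      if pvLen p > st.1 then (pvLen p, [p])
      else if pvLen p = st.1 then (st.1, st.2 ++ [p])
      else st) := rfl
  rw [hstep, pv_loop_char]
  cases hP : pvPairs pokedex k with
  | nil =>
    have h : PySem.List.max? ([] : List Int) (fun x => x) = none := by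
      rw [PySem.List.max?_eq_none_iff]
    simp [pvM, h]
  | cons q qs =>
    rw [List.map_cons, PySem.List.max?_id_cons]
    have h0 : max 0 (pvLen q) = pvLen q := max_eq_right (by simp [pvLen])
    have hMeq : pvM (q :: qs) 0 = (qs.map pvLen).foldl max (pvLen q) := by
      simp [pvM, h0]
    rw [Option.getD_some, ← hMeq]
    split_ifs <;> simp
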